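-- pv_equiv track=rewrite | github.com/yatchenkods/agile-poker | app/utils/jira_text_parser.py | _apply_text_formatting
-- ===== SOURCE A (Python) =====
-- def _apply_text_formatting(text: str, marks: list) -> str:
--     """
--     Apply text formatting based on Jira marks.
--
--     Args:
--         text: Original text
--         marks: List of formatting marks (bold, italic, code, etc.)
--
--     Returns:
--         Formatted text
--     """
--     if not marks:
--         return text
--
--     result = text
--
--     for mark in marks:
--         if not isinstance(mark, dict):
--             continue
--
--         mark_type = mark.get('type')
--
--         if mark_type == 'bold':
--             result = f'**{result}**'
--         elif mark_type == 'italic':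
--             result = f'*{result}*'
--         elif mark_type == 'code':
--             result = f'`{result}`'
--         elif mark_type == 'strike':
--             result = f'~~{result}~~'
--         elif mark_type == 'underline':
--             result = f'__{result}__'
--         elif mark_type == 'em':
--             result = f'*{result}*'
--         elif mark_type == 'strong':
--             result = f'**{result}**'
--
--     return result
-- ===== SOURCE B (Python) =====
-- _FORMATS = {
--     'bold': ('**', '**'),
--     'strong': ('**', '**'),
--     'italic': ('*', '*'),
--     'em': ('*', '*'),
--     'code': ('`', '`'),
--     'strike': ('~~', '~~'),
--     'underline': ('__', '__'),
-- }
--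
--
-- def _apply_text_formatting(text: str, marks: list) -> str:
--     if not marks:
--         return text
--     prefixes = []
--     suffixes = []
--     for mark in marks:
--         if not isinstance(mark, dict):
--             continue
--         fmt = _FORMATS.get(mark.get('type'))
--         if fmt is None:
--             continue
--         prefixes.append(fmt[0])
--         suffixes.append(fmt[1])
--     return ''.join(reversed(prefixes)) + text + ''.join(suffixes)
-- ===== Notes on version B (the rewrite author's own statement) =====
-- stated objective: alternative
-- what changed: Instead of rebuilding the whole string once per mark via an if/elif chain, B does one pass over the marks collecting (prefix, suffix) pairs from a lookup table and concatenates reversed prefixes + text + suffixes once at the end.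
import Mathlib
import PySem

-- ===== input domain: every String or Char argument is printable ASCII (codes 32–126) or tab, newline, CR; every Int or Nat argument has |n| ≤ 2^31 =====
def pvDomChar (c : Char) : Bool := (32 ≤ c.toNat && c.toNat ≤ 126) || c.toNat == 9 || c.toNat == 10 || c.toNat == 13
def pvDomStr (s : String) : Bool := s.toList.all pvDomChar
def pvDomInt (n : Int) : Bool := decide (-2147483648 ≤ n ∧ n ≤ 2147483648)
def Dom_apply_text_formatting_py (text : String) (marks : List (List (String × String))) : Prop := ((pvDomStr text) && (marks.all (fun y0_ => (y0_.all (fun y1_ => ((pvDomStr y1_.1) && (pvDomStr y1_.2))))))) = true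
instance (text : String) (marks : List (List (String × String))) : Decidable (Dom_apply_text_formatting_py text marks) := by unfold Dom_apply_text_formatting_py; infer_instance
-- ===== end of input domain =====

-- B collects (prefix, suffix) pairs in one pass and concatenates once, instead of rebuilding the string per mark (objective: alternative decomposition).
-- marks elements are typed dicts here, so A's `isinstance(mark, dict)` guard is always true and is not ported.
-- ===== PORT A =====
def pyDictGetType (mark : List (String × String)) : Option String :=
  ((PySem.Dict.mk mark).get? "type")

def applyMarkA (result : String) (mark : List (String × String)) : String :=
  let mt := pyDictGetType mark
  if mt = some "bold" then "**" ++ result ++ "**"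
  else if mt = some "italic" then "*" ++ result ++ "*"
  else if mt = some "code" then "`" ++ result ++ "`"
  else if mt = some "strike" then "~~" ++ result ++ "~~"
  else if mt = some "underline" then "__" ++ result ++ "__"
  else if mt = some "em" then "*" ++ result ++ "*"
  else if mt = some "strong" then "**" ++ result ++ "**"
  else result

def apply_text_formatting_py (text : String) (marks : List (List (String × String))) : String :=
  if marks = [] then text
  else marks.foldl applyMarkA text

-- ===== PORT B =====
def formatsB : PySem.Dict String (String × String) :=
  PySem.Dict.mk [("bold", ("**", "**")), ("strong", ("**", "**")), ("italic", ("*", "*")),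
    ("em", ("*", "*")), ("code", ("`", "`")), ("strike", ("~~", "~~")), ("underline", ("__", "__"))]

def collectB (st : List String × List String) (mark : List (String × String)) :
    List String × List String :=
  match pyDictGetType mark with
  | none => st
  | some t =>
    match formatsB.get? t with
    | none => st
    | some fmt => (st.1 ++ [fmt.1], st.2 ++ [fmt.2])

def apply_text_formatting_py_alt (text : String) (marks : List (List (String × String))) : String :=
  if marks = [] then text
  else
    let st := marks.foldl collectB ([], [])
    String.join st.1.reverse ++ text ++ String.join st.2

-- ===== PRECONDITION & SPEC =====
def Spec_apply_text_formatting_py (text : String) (marks : List (List (String × String))) (out : String) : Prop := out = apply_text_formatting_py_alt text marks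
instance (text : String) (marks : List (List (String × String))) (out : String) : Decidable (Spec_apply_text_formatting_py text marks out) := by unfold Spec_apply_text_formatting_py; infer_instance

-- ===== CLAIM (what is proved, stated in full; the proofs are below) =====
def Claim_equal_apply_text_formatting_py : Prop := ∀ (text : String) (marks : List (List (String × String))), Dom_apply_text_formatting_py text marks → Spec_apply_text_formatting_py text marks (apply_text_formatting_py text marks)

-- ===== LEMMAS AND PROOFS =====

lemma join_shift (a : String) (l : List String) :
    List.foldl (fun r s => r ++ s) a l = a ++ String.join l := by
  simp only [String.join]
  induction l generalizing a with
  | nil => simp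
  | cons x xs ih =>
    simp only [List.foldl_cons]
    rw [ih, ih ("" ++ x)]
    simp [String.append_assoc]

lemma join_append (l1 l2 : List String) :
    String.join (l1 ++ l2) = String.join l1 ++ String.join l2 := by
  rw [String.join, List.foldl_append, join_shift]
  rfl

lemma collectB_shift (ms : List (List (String × String))) (a b : List String) :
    ms.foldl collectB (a, b) =
      (a ++ (ms.foldl collectB ([], [])).1, b ++ (ms.foldl collectB ([], [])).2) := by
  induction ms generalizing a b with
  | nil => simp
  | cons m rest ih =>
    simp only [List.foldl_cons]
    rw [ih, ih (collectB ([], []) m).1 (collectB ([], []) m).2]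
    unfold collectB
    cases hd : pyDictGetType m with
    | none => simp
    | some t =>
      cases hf : formatsB.get? t with
      | none => simp [hf]
      | some fmt => simp [hf]

lemma collect_fst_reverse (m : List (String × String)) :
    (collectB ([], []) m).1.reverse = (collectB ([], []) m).1 := by
  unfold collectB
  cases hd : pyDictGetType m with
  | none => simp
  | some t =>
    cases hf : formatsB.get? t with
    | none => simp [hf]
    | some fmt => simp [hf]

lemma applyMarkA_eq_collect (text : String) (m : List (String × String)) :
    applyMarkA text m =
      String.join (collectB ([], []) m).1 ++ text ++ String.join (collectB ([], []) m).2 := by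
  unfold applyMarkA collectB
  cases h : pyDictGetType m with
  | none => simp [String.join]
  | some t =>
    simp only [Option.some.injEq, formatsB, PySem.Dict.get?_mk_cons]
    by_cases h1 : t = "bold"
    · subst h1; simp [String.join, String.append_assoc]
    by_cases h2 : t = "italic"
    · subst h2; simp [String.join, String.append_assoc]
    by_cases h3 : t = "code"
    · subst h3; simp [String.join, String.append_assoc]
    by_cases h4 : t = "strike"
    · subst h4; simp [String.join, String.append_assoc]
    by_cases h5 : t = "underline"
    · subst h5; simp [String.join, String.append_assoc]
    by_cases h6 : t = "em"
    · subst h6; simp [String.join, String.append_assoc]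
    by_cases h7 : t = "strong"
    · subst h7; simp [String.join, String.append_assoc]
    simp [h1, h2, h3, h4, h5, h6, h7, Ne.symm h1, Ne.symm h2, Ne.symm h3, Ne.symm h4,
      Ne.symm h5, Ne.symm h6, Ne.symm h7, String.join, PySem.Dict.get?]

lemma main_loop (ms : List (List (String × String))) (text : String) :
    ms.foldl applyMarkA text =
      String.join (ms.foldl collectB ([], [])).1.reverse ++ text ++
        String.join (ms.foldl collectB ([], [])).2 := by
  induction ms generalizing text with
  | nil => simp [String.join]
  | cons m rest ih =>
    simp only [List.foldl_cons]
    rw [ih (applyMarkA text m), applyMarkA_eq_collect,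
      collectB_shift rest (collectB ([], []) m).1 (collectB ([], []) m).2]
    simp only [List.reverse_append, join_append, collect_fst_reverse]
    simp [String.append_assoc]

-- ===== VERDICT (by name: the statement is the Claim_ definition above) =====
theorem apply_text_formatting_py_spec : Claim_equal_apply_text_formatting_py := by
  intro text marks _
  unfold Spec_apply_text_formatting_py apply_text_formatting_py apply_text_formatting_py_alt
  by_cases h : marks = []
  · simp [h]
  · simp only [h, if_false]
    exact main_loop marks text
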